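-- pv_equiv track=rewrite | github.com/alchin2/webreg-to-ics | webreg/calendar.py | weekday_indices
-- ===== SOURCE A (Python) =====
-- DAY_MAP = {
--     "M": 0,
--     "Tu": 1,
--     "W": 2,
--     "Th": 3,
--     "F": 4,
-- }
--
-- def weekday_indices(days: str):
--     i = 0
--     out = []
--     while i < len(days):
--         if days[i:i + 2] in DAY_MAP:
--             out.append(DAY_MAP[days[i:i + 2]])
--             i += 2
--         elif days[i] in DAY_MAP:
--             out.append(DAY_MAP[days[i]])
--             i += 1
--         else:
--             i += 1
--     return out
-- ===== SOURCE B (Python) =====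
-- import re
--
-- DAY_MAP = {
--     "M": 0,
--     "Tu": 1,
--     "W": 2,
--     "Th": 3,
--     "F": 4,
-- }
--
-- _DAY_RE = re.compile(r"Tu|Th|M|W|F")
--
-- def weekday_indices(days: str):
--     return [DAY_MAP[t] for t in _DAY_RE.findall(days)]
-- ===== Notes on version B (the rewrite author's own statement) =====
-- stated objective: faster
-- what changed: Replaces the manual index/slice while-loop with a compiled regex (Tu|Th|M|W|F) whose non-overlapping left-to-right findall performs the same greedy tokenization in C, followed by a list-comprehension map through DAY_MAP.
import Mathlib
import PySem

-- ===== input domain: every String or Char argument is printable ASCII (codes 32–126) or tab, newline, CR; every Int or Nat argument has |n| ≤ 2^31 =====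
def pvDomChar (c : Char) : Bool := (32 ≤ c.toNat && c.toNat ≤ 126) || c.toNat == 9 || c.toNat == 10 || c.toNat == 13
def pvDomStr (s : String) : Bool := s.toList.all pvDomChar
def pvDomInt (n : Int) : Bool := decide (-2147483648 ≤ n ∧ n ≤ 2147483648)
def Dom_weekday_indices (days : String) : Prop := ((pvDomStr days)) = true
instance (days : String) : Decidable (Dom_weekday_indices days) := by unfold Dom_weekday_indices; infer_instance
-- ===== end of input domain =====

-- B replaces A's manual index/slice while-loop by a regex-findall tokenization (Tu|Th|M|W|F) mapped through DAY_MAP (measured faster in a timing run: constant-factor, compiled regex).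

-- DAY_MAP from the Python module
def dayMap : PySem.Dict String Int :=
  PySem.Dict.mk [("M", 0), ("Tu", 1), ("W", 2), ("Th", 3), ("F", 4)]

-- ===== PORT A =====
-- the while-loop: index i, slices days[i:i+2] / days[i], accumulator out
def loopA (cs : List Char) (i : Nat) (out : List Int) : List Int :=
  if h : i < cs.length then
    match dayMap.get? (String.ofList (PySem.List.slice cs (some (i : Int)) (some ((i : Int) + 2)))) with
    | some v => loopA cs (i + 2) (out ++ [v])
    | none =>
      match dayMap.get? (String.ofList [cs[i]]) with
      | some v => loopA cs (i + 1) (out ++ [v])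
      | none => loopA cs (i + 1) out
  else out
termination_by cs.length - i

def weekday_indices (days : String) : List Int := loopA days.toList 0 []

-- ===== PORT B =====
-- hand transliteration of re.findall(r"Tu|Th|M|W|F", days): left-to-right non-overlapping
-- scan; at each position the alternation tries Tu, Th, then the single-char tokens, and on
-- failure the scanner advances one character — exact for this pattern on any string.
def tokensB : List Char → List String
  | [] => []
  | [c] => if c = 'M' then ["M"] else if c = 'W' then ["W"] else if c = 'F' then ["F"] else []
  | c :: x :: rest =>
    if c = 'T' ∧ x = 'u' then "Tu" :: tokensB rest
    else if c = 'T' ∧ x = 'h' then "Th" :: tokensB rest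
    else if c = 'M' then "M" :: tokensB (x :: rest)
    else if c = 'W' then "W" :: tokensB (x :: rest)
    else if c = 'F' then "F" :: tokensB (x :: rest)
    else tokensB (x :: rest)

def weekday_indices_alt (days : String) : List Int :=
  (tokensB days.toList).map (fun t => (dayMap.get? t).getD 0)

-- ===== PRECONDITION & SPEC =====
def Spec_weekday_indices (days : String) (out : List Int) : Prop := out = weekday_indices_alt days
instance (days : String) (out : List Int) : Decidable (Spec_weekday_indices days out) := by unfold Spec_weekday_indices; infer_instance

-- ===== CLAIM (what is proved, stated in full; the proofs are below) =====
def Claim_equal_weekday_indices : Prop := ∀ (days : String), Dom_weekday_indices days → Spec_weekday_indices days (weekday_indices days)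

-- ===== LEMMAS AND PROOFS =====

theorem get?_dayMap_none_head {c : Char} (l : List Char)
    (hM : c ≠ 'M') (hT : c ≠ 'T') (hW : c ≠ 'W') (hF : c ≠ 'F') :
    dayMap.get? (String.ofList (c :: l)) = none := by
  simp [dayMap, PySem.Dict.get?, String.ext_iff,
    String.toList_ofList, Ne.symm hM, Ne.symm hT, Ne.symm hW, Ne.symm hF]

theorem get?_dayMap_none_T {x : Char} (l : List Char) (hu : x ≠ 'u') (hh : x ≠ 'h') :
    dayMap.get? (String.ofList ('T' :: x :: l)) = none := by
  simp [dayMap, PySem.Dict.get?, String.ext_iff,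
    String.toList_ofList, Ne.symm hu, Ne.symm hh]

theorem slice_two (cs : List Char) (i : Nat) :
    PySem.List.slice cs (some (i : Int)) (some ((i : Int) + 2)) = (cs.drop i).take 2 := by
  rw [show ((i : Int) + 2) = ((i : Int) + ((2 : Nat) : Int)) by norm_num,
    PySem.List.slice_natCast_add]

theorem drop_succ_of_drop {cs : List Char} {i : Nat} {c : Char} {r : List Char}
    (ht : cs.drop i = c :: r) : cs.drop (i + 1) = r := by
  rw [← List.tail_drop, ht]; rfl

def fB : String → Int := fun t => (dayMap.get? t).getD 0

theorem loopA_eq : ∀ (n : Nat) (cs : List Char) (i : Nat) (out : List Int),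
    cs.length - i ≤ n → loopA cs i out = out ++ (tokensB (cs.drop i)).map fB := by
  intro n
  induction n with
  | zero =>
    intro cs i out h
    have hi : ¬ i < cs.length := by omega
    rw [loopA, dif_neg hi, List.drop_eq_nil_iff.mpr (by omega), tokensB]
    simp
  | succ n ih =>
    intro cs i out h
    by_cases hi : i < cs.length
    · obtain ⟨c, r, ht⟩ : ∃ c r, cs.drop i = c :: r := by
        cases h' : cs.drop i with
        | nil => exact absurd (by simpa using congrArg List.length h') (by omega)
        | cons c r => exact ⟨c, r, rfl⟩
      have hc0 : cs[i] = c := by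
        have h0 : (cs.drop i)[0]? = some c := by rw [ht]; rfl
        rw [List.getElem?_drop] at h0
        have h0' : cs[i]? = some c := by simpa using h0
        obtain ⟨_, heq⟩ := List.getElem?_eq_some_iff.mp h0'
        exact heq
      have hlen : cs.length - i = r.length + 1 := by
        have := congrArg List.length ht; simp at this; omega
      have hd1 : cs.drop (i + 1) = r := drop_succ_of_drop ht
      have hb1 : cs.length - (i + 1) ≤ n := by omega
      rw [loopA, dif_pos hi, slice_two, ht, hc0]
      by_cases hcT : c = 'T'
      · subst hcT
        cases r with
        | nil =>
          rw [show ('T' :: ([] : List Char)).take 2 = ['T'] from rfl,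
            show dayMap.get? (String.ofList ['T']) = none by decide]
          show loopA cs (i + 1) out = _
          rw [ih cs (i + 1) out hb1, hd1]; rfl
        | cons x r2 =>
          have hd2 : cs.drop (i + 2) = r2 := by
            rw [show i + 2 = (i + 1) + 1 by omega]
            exact drop_succ_of_drop (by rw [hd1])
          have hb2 : cs.length - (i + 2) ≤ n := by omega
          by_cases hxu : x = 'u'
          · subst hxu
            rw [show (('T' : Char) :: 'u' :: r2).take 2 = ['T', 'u'] from rfl,
              show dayMap.get? (String.ofList ['T', 'u']) = some 1 by decide]
            show loopA cs (i + 2) (out ++ [1]) = _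
            rw [ih cs (i + 2) (out ++ [1]) hb2, hd2]
            simp [tokensB, fB]
            decide
          · by_cases hxh : x = 'h'
            · subst hxh
              rw [show (('T' : Char) :: 'h' :: r2).take 2 = ['T', 'h'] from rfl,
                show dayMap.get? (String.ofList ['T', 'h']) = some 3 by decide]
              show loopA cs (i + 2) (out ++ [3]) = _
              rw [ih cs (i + 2) (out ++ [3]) hb2, hd2]
              simp [tokensB, fB]
              decide
            · rw [show (('T' : Char) :: x :: r2).take 2 = ['T', x] from rfl,
                get?_dayMap_none_T _ hxu hxh,
                show dayMap.get? (String.ofList ['T']) = none by decide]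
              show loopA cs (i + 1) out = _
              rw [ih cs (i + 1) out hb1, hd1]
              simp [tokensB, hxu, hxh]
      · by_cases hcM : c = 'M'
        · subst hcM
          cases r with
          | nil =>
            simp only [List.length_nil] at hlen
            rw [show ('M' :: ([] : List Char)).take 2 = ['M'] from rfl,
              show dayMap.get? (String.ofList ['M']) = some 0 by decide]
            show loopA cs (i + 2) (out ++ [0]) = _
            rw [ih cs (i + 2) (out ++ [0]) (by omega),
              List.drop_eq_nil_iff.mpr (by omega)]
            simp [tokensB, fB]
            decide
          | cons x r2 =>
            rw [show (('M' : Char) :: x :: r2).take 2 = ['M', x] from rfl,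
              show dayMap.get? (String.ofList ['M', x]) = none by
                simp [dayMap, PySem.Dict.get?, String.ext_iff, String.toList_ofList],
              show dayMap.get? (String.ofList ['M']) = some 0 by decide]
            show loopA cs (i + 1) (out ++ [0]) = _
            rw [ih cs (i + 1) (out ++ [0]) hb1, hd1]
            simp [tokensB, fB]
            decide
        · by_cases hcW : c = 'W'
          · subst hcW
            cases r with
            | nil =>
              simp only [List.length_nil] at hlen
              rw [show ('W' :: ([] : List Char)).take 2 = ['W'] from rfl,
                show dayMap.get? (String.ofList ['W']) = some 2 by decide]
              show loopA cs (i + 2) (out ++ [2]) = _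
              rw [ih cs (i + 2) (out ++ [2]) (by omega),
                List.drop_eq_nil_iff.mpr (by omega)]
              simp [tokensB, fB]
              decide
            | cons x r2 =>
              rw [show (('W' : Char) :: x :: r2).take 2 = ['W', x] from rfl,
                show dayMap.get? (String.ofList ['W', x]) = none by
                  simp [dayMap, PySem.Dict.get?, String.ext_iff, String.toList_ofList],
                show dayMap.get? (String.ofList ['W']) = some 2 by decide]
              show loopA cs (i + 1) (out ++ [2]) = _
              rw [ih cs (i + 1) (out ++ [2]) hb1, hd1]
              simp [tokensB, fB]
              decide
          · by_cases hcF : c = 'F'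
            · subst hcF
              cases r with
              | nil =>
                simp only [List.length_nil] at hlen
                rw [show ('F' :: ([] : List Char)).take 2 = ['F'] from rfl,
                  show dayMap.get? (String.ofList ['F']) = some 4 by decide]
                show loopA cs (i + 2) (out ++ [4]) = _
                rw [ih cs (i + 2) (out ++ [4]) (by omega),
                  List.drop_eq_nil_iff.mpr (by omega)]
                simp [tokensB, fB]
                decide
              | cons x r2 =>
                rw [show (('F' : Char) :: x :: r2).take 2 = ['F', x] from rfl,
                  show dayMap.get? (String.ofList ['F', x]) = none by
                    simp [dayMap, PySem.Dict.get?, String.ext_iff, String.toList_ofList],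
                  show dayMap.get? (String.ofList ['F']) = some 4 by decide]
                show loopA cs (i + 1) (out ++ [4]) = _
                rw [ih cs (i + 1) (out ++ [4]) hb1, hd1]
                simp [tokensB, fB]
                decide
            · have hnone2 : dayMap.get? (String.ofList ((c :: r).take 2)) = none := by
                cases r with
                | nil => exact get?_dayMap_none_head _ hcM hcT hcW hcF
                | cons x r2 => exact get?_dayMap_none_head _ hcM hcT hcW hcF
              have hnone1 : dayMap.get? (String.ofList [c]) = none :=
                get?_dayMap_none_head [] hcM hcT hcW hcF
              rw [hnone2, hnone1]
              show loopA cs (i + 1) out = _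
              rw [ih cs (i + 1) out hb1, hd1]
              cases r with
              | nil => simp [tokensB, hcM, hcW, hcF]
              | cons x r2 =>
                have hTu : ¬ (c = 'T' ∧ x = 'u') := fun hh => hcT hh.1
                have hTh : ¬ (c = 'T' ∧ x = 'h') := fun hh => hcT hh.1
                simp [tokensB, hTu, hTh, hcM, hcW, hcF]
    · rw [loopA, dif_neg hi, List.drop_eq_nil_iff.mpr (by omega), tokensB]
      simp

-- ===== VERDICT (by name: the statement is the Claim_ definition above) =====
theorem weekday_indices_spec : Claim_equal_weekday_indices := by
  intro days _
  unfold Spec_weekday_indices weekday_indices weekday_indices_alt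
  rw [loopA_eq days.toList.length days.toList 0 [] (by omega)]
  simp [fB]
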